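-- pv_equiv track=rewrite | github.com/spartan8806/atles | atles/thinking_client.py | _is_simple_request
-- ===== SOURCE A (Python) =====
-- def _is_simple_request(prompt: str) -> bool:
--     """Check if this is a simple request that doesn't need deep thinking."""
--     simple_patterns = [
--         "hi", "hello", "hey", "thanks", "thank you", "ok", "okay",
--         "yes", "no", "bye", "goodbye"
--     ]
--     prompt_lower = prompt.lower().strip()
--
--     # Very short prompts are usually simple
--     if len(prompt_lower) < 20:
--         for pattern in simple_patterns:
--             if prompt_lower == pattern or prompt_lower.startswith(pattern + " "):
--                 return True
--
--     return False
-- ===== SOURCE B (Python) =====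
-- def _is_simple_request(prompt: str) -> bool:
--     """Check if this is a simple request that doesn't need deep thinking."""
--     s = prompt.lower().strip()
--     if len(s) >= 20:
--         return False
--     # first whitespace-free token of s (everything before the first space)
--     i = s.find(" ")
--     head = s if i == -1 else s[:i]
--     return (head in {"hi", "hello", "hey", "thanks", "ok", "okay",
--                      "yes", "no", "bye", "goodbye"}
--             or s == "thank you" or s.startswith("thank you "))
-- ===== Notes on version B (the rewrite author's own statement) =====
-- stated objective: idiomatic
-- what changed: B extracts the first space-delimited token of the lowered/stripped prompt once and tests it for membership in a set of greeting words (with a single special case for the two-word pattern 'thank you'), replacing A's loop that runs an equality test and a prefix-plus-space scan for every pattern.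
import Mathlib
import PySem

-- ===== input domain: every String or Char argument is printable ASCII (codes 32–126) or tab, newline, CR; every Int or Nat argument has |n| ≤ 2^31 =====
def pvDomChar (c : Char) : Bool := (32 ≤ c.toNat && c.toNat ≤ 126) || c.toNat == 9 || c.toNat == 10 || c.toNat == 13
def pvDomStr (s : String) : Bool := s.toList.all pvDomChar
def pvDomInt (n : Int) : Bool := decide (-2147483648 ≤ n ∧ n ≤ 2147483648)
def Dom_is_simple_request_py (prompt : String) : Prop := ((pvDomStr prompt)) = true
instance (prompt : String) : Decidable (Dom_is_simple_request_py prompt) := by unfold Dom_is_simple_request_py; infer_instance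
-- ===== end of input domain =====

-- B replaces A's per-pattern prefix scan by extracting the first space-delimited
-- token once and testing set membership (objective: alternative/idiomatic; equal value everywhere).

-- ===== PORT A =====
-- literal transliteration of _is_simple_request: loop over patterns, equality or prefix+space test
def is_simple_request_py (prompt : String) : Bool :=
  let simple_patterns : List String :=
    ["hi", "hello", "hey", "thanks", "thank you", "ok", "okay",
     "yes", "no", "bye", "goodbye"]
  let prompt_lower := PySem.Str.strip (PySem.Str.lower prompt)
  if PySem.Str.len prompt_lower < 20 then
    simple_patterns.any (fun pattern =>
      prompt_lower == pattern ||
      PySem.Str.startswith prompt_lower (pattern ++ " "))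
  else
    false

-- ===== PORT B =====
-- transliteration of Source B: first token before the first space, then set membership
def is_simple_request_py_alt (prompt : String) : Bool :=
  let s := PySem.Str.strip (PySem.Str.lower prompt)
  if 20 ≤ PySem.Str.len s then
    false
  else
    let i := PySem.Str.find s " "
    let head := if i == -1 then s else PySem.Str.slice s (some 0) (some i)
    (["hi", "hello", "hey", "thanks", "ok", "okay",
      "yes", "no", "bye", "goodbye"] : List String).contains head
    || s == "thank you" || PySem.Str.startswith s "thank you "

-- ===== PRECONDITION & SPEC =====
def Spec_is_simple_request_py (prompt : String) (out : Bool) : Prop := out = is_simple_request_py_alt prompt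
instance (prompt : String) (out : Bool) : Decidable (Spec_is_simple_request_py prompt out) := by unfold Spec_is_simple_request_py; infer_instance

-- ===== CLAIM (what is proved, stated in full; the proofs are below) =====
def Claim_equal_is_simple_request_py : Prop := ∀ (prompt : String), Dom_is_simple_request_py prompt → Spec_is_simple_request_py prompt (is_simple_request_py prompt)

-- ===== LEMMAS AND PROOFS =====

-- find.go with needle [' '] returns k + length of the space-free prefix, or -1
theorem pv_go_space (l : List Char) : ∀ (k : Nat),
    PySem.Chars.find.go [' '] l k =
      (if ' ' ∈ l then ((k + (l.takeWhile (fun c => c ≠ ' ')).length : Nat) : Int) else -1) := by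
  induction l with
  | nil => intro k; simp [PySem.Chars.find.go]
  | cons c t ih =>
    intro k
    by_cases hc : c = ' '
    · subst hc
      simp [PySem.Chars.find.go, List.isPrefixOf, List.takeWhile]
    · have hpre : List.isPrefixOf [' '] (c :: t) = false := by
        simp [List.isPrefixOf]
        exact fun h => hc h.symm
      rw [PySem.Chars.find.go]
      rw [hpre]
      simp only [Bool.false_eq_true, if_false]
      rw [ih (k + 1)]
      by_cases hm : ' ' ∈ t
      · have : ' ' ∈ c :: t := List.mem_cons_of_mem _ hm
        simp [hm, this, List.takeWhile, hc]
        omega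
      · have : ' ' ∉ c :: t := by
          intro h
          rcases List.mem_cons.mp h with h | h
          · exact hc h.symm
          · exact hm h
        simp [hm, this]

-- take of the takeWhile-length is takeWhile
theorem pv_take_takeWhile (p : Char → Bool) (l : List Char) :
    l.take (l.takeWhile p).length = l.takeWhile p := by
  induction l with
  | nil => simp
  | cons c t ih =>
    by_cases h : p c
    · simp [List.takeWhile, h, ih]
    · simp [List.takeWhile, h]

-- xs[0:n] is take n when 0 ≤ n ≤ len
theorem pv_slice_take (l : List Char) (n : Nat) (hn : n ≤ l.length) :
    PySem.List.slice l (some 0) (some (n : Int)) = l.take n := by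
  unfold PySem.List.slice PySem.List.clampIdx
  simp
  split_ifs <;> omega

-- B's head computation equals takeWhile (· ≠ ' ')
theorem pv_head_eq_takeWhile (l : List Char) :
    (if PySem.Chars.find l [' '] == -1 then l
     else PySem.List.slice l (some 0) (some (PySem.Chars.find l [' ']))) =
    l.takeWhile (fun c => c ≠ ' ') := by
  have hfind : PySem.Chars.find l [' '] =
      (if ' ' ∈ l then (((l.takeWhile (fun c => c ≠ ' ')).length : Nat) : Int) else -1) := by
    have := pv_go_space l 0
    simpa [PySem.Chars.find] using this
  by_cases hm : ' ' ∈ l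
  · have hlen : (l.takeWhile (fun c => c ≠ ' ')).length ≤ l.length :=
      (List.takeWhile_prefix _).length_le
    rw [hfind]
    simp only [hm, if_true]
    have hne : (((l.takeWhile (fun c => c ≠ ' ')).length : Nat) : Int) ≠ -1 := by
      omega
    simp only [beq_iff_eq, hne, if_false]
    rw [pv_slice_take l _ hlen, pv_take_takeWhile]
  · rw [hfind]
    simp only [hm, if_false]
    simp only [beq_self_eq_true, if_true]
    symm
    apply List.takeWhile_eq_self_iff.mpr
    intro a ha
    simp only [decide_eq_true_eq]
    intro h; subst h; exact hm ha

-- the tail of dropWhile starts with a failing element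
theorem pv_dropWhile_head (p : Char → Bool) (l : List Char) (c : Char) (r : List Char)
    (h : l.dropWhile p = c :: r) : p c = false := by
  induction l with
  | nil => simp at h
  | cons a t ih =>
    by_cases ha : p a
    · rw [List.dropWhile_cons_of_pos ha] at h; exact ih h
    · rw [List.dropWhile_cons_of_neg ha] at h
      cases h
      simpa using ha

-- takeWhile over an append whose first part wholly satisfies p
theorem pv_takeWhile_append (p : Char → Bool) (l r : List Char) (h : ∀ a ∈ l, p a) :
    (l ++ r).takeWhile p = l ++ r.takeWhile p := by
  induction l with
  | nil => simp
  | cons a t ih =>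
    have ha : p a := h a (List.mem_cons_self)
    simp only [List.cons_append, List.takeWhile_cons_of_pos ha]
    rw [ih (fun b hb => h b (List.mem_cons_of_mem _ hb))]

-- the core characterisation: A's per-pattern test is the token test, for a nonempty space-free pattern
theorem pv_pattern_iff (l q : List Char) (hq : q ≠ []) (hsp : ' ' ∉ q) :
    (l = q ∨ (q ++ [' ']) <+: l) ↔ l.takeWhile (fun c => c ≠ ' ') = q := by
  constructor
  · rintro (rfl | ⟨r, hr⟩)
    · apply List.takeWhile_eq_self_iff.mpr
      intro a ha
      simp only [decide_eq_true_eq]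
      intro h; subst h; exact hsp ha
    · subst hr
      rw [List.append_assoc]
      rw [pv_takeWhile_append _ _ _ (by
        intro a ha
        simp only [decide_eq_true_eq]
        intro h; subst h; exact hsp ha)]
      simp
  · intro h
    have hsplit : l = l.takeWhile (fun c => c ≠ ' ') ++ l.dropWhile (fun c => c ≠ ' ') :=
      (List.takeWhile_append_dropWhile).symm
    rcases hd : l.dropWhile (fun c => c ≠ ' ') with _ | ⟨c, r⟩
    · left
      rw [hsplit, hd, h, List.append_nil]
    · right
      have hc : (fun c => decide (c ≠ ' ')) c = false := pv_dropWhile_head _ l c r hd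
      have hc' : c = ' ' := by simpa using hc
      subst hc'
      exact ⟨r, by rw [hsplit, hd, h]; simp⟩

-- Bool form of the per-pattern characterisation, at the String level
theorem pv_pattern_bool (s q : String) (hq : q.toList ≠ []) (hsp : ' ' ∉ q.toList) :
    ((s == q) || PySem.Str.startswith s (q ++ " ")) =
    decide (s.toList.takeWhile (fun c => c ≠ ' ') = q.toList) := by
  rw [Bool.eq_iff_iff]
  simp only [Bool.or_eq_true, beq_iff_eq, PySem.Str.startswith_eq, PySem.Chars.startswith_iff,
    decide_eq_true_eq, String.toList_append]
  rw [← pv_pattern_iff s.toList q.toList hq hsp]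
  constructor
  · rintro (rfl | h)
    · exact Or.inl rfl
    · right; simpa using h
  · rintro (h | h)
    · left; exact String.toList_inj.mp (by rw [h])
    · right; simpa using h


-- token equality against a string literal, through toList
theorem pv_tok_beq (h q : String) (tok : List Char) (hh : h.toList = tok) :
    (h == q) = decide (tok = q.toList) := by
  rw [Bool.eq_iff_iff]
  simp only [beq_iff_eq, decide_eq_true_eq]
  constructor
  · rintro rfl; rw [hh]
  · intro hq
    apply String.toList_inj.mp
    rw [hh, hq]

-- ===== VERDICT (by name: the statement is the Claim_ definition above) =====
set_option maxHeartbeats 1000000 in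
theorem is_simple_request_py_spec : Claim_equal_is_simple_request_py := by
  intro prompt _
  unfold Spec_is_simple_request_py is_simple_request_py is_simple_request_py_alt
  set s := PySem.Str.strip (PySem.Str.lower prompt) with hs
  by_cases hlen : PySem.Str.len s < 20
  · have hlen' : ¬ (20 ≤ PySem.Str.len s) := by omega
    simp only [hlen, if_true, hlen', if_false]
    set h : String := (if PySem.Str.find s " " == -1 then s
         else PySem.Str.slice s (some 0) (some (PySem.Str.find s " "))) with hhdef
    have hsp : (" " : String).toList = [' '] := by decide
    have hh : h.toList = s.toList.takeWhile (fun c => c ≠ ' ') := by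
      rw [hhdef, apply_ite String.toList]
      rw [PySem.Str.find_eq, hsp]
      rw [PySem.Str.toList_slice]
      exact pv_head_eq_takeWhile s.toList
    have hty : ("thank you" ++ " " : String) = "thank you " := by decide
    simp only [List.any_cons, List.any_nil, Bool.or_false]
    rw [pv_pattern_bool s "hi" (by decide) (by decide),
        pv_pattern_bool s "hello" (by decide) (by decide),
        pv_pattern_bool s "hey" (by decide) (by decide),
        pv_pattern_bool s "thanks" (by decide) (by decide),
        pv_pattern_bool s "ok" (by decide) (by decide),
        pv_pattern_bool s "okay" (by decide) (by decide),
        pv_pattern_bool s "yes" (by decide) (by decide),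
        pv_pattern_bool s "no" (by decide) (by decide),
        pv_pattern_bool s "bye" (by decide) (by decide),
        pv_pattern_bool s "goodbye" (by decide) (by decide),
        hty]
    simp only [List.contains_cons, List.contains_nil, Bool.or_false]
    rw [pv_tok_beq h "hi" _ hh, pv_tok_beq h "hello" _ hh, pv_tok_beq h "hey" _ hh,
        pv_tok_beq h "thanks" _ hh, pv_tok_beq h "ok" _ hh, pv_tok_beq h "okay" _ hh,
        pv_tok_beq h "yes" _ hh, pv_tok_beq h "no" _ hh, pv_tok_beq h "bye" _ hh,
        pv_tok_beq h "goodbye" _ hh]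
    generalize s.toList.takeWhile (fun c => c ≠ ' ') = tok
    generalize (decide (tok = ("hi" : String).toList) : Bool) = b1
    generalize (decide (tok = ("hello" : String).toList) : Bool) = b2
    generalize (decide (tok = ("hey" : String).toList) : Bool) = b3
    generalize (decide (tok = ("thanks" : String).toList) : Bool) = b4
    generalize (decide (tok = ("ok" : String).toList) : Bool) = b5
    generalize (decide (tok = ("okay" : String).toList) : Bool) = b6
    generalize (decide (tok = ("yes" : String).toList) : Bool) = b7
    generalize (decide (tok = ("no" : String).toList) : Bool) = b8
    generalize (decide (tok = ("bye" : String).toList) : Bool) = b9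
    generalize (decide (tok = ("goodbye" : String).toList) : Bool) = b10
    generalize (s == ("thank you" : String) : Bool) = bx
    generalize (PySem.Str.startswith s "thank you " : Bool) = by'
    cases b1 <;> cases b2 <;> cases b3 <;> cases b4 <;> cases b5 <;> cases b6 <;>
      cases b7 <;> cases b8 <;> cases b9 <;> cases b10 <;> cases bx <;> cases by' <;> rfl
  · have hlen' : (20 ≤ PySem.Str.len s) := by omega
    simp only [hlen, if_false, hlen', if_true]
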